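-- pv_equiv track=rewrite | github.com/shazzadD47/test | app/v3/endpoints/general_extraction/services/helpers/common_helpers.py | find_matching_unit_labels
-- ===== SOURCE A (Python) =====
-- def check_if_unit_label(label: str) -> bool:
--     return label.lower().strip().endswith("_unit")
--
-- def get_unit_label_prefix(unit_label_name: str) -> str:
--     """
--     Extract the prefix from a unit label by removing the _unit suffix
--     (case-insensitive), preserving the original case of the prefix.
--
--     e.g., "weight_UNIT" -> "weight", "Weight_unit" -> "Weight"
--     """
--     return unit_label_name[:-5]
--
-- def find_matching_unit_labels(
--     label_name: str,
--     all_label_names: list[str],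
-- ) -> list[str]:
--     """
--     Find unit label names in all_label_names that correspond to the given
--     label name. Returns all matches — both exact case matches (unit label
--     prefix == label_name) and case-insensitive matches — with exact matches
--     listed first.
--
--     For example, if label_name is "ARM_NUMBER" and all_label_names contains
--     ["ARM_NUMBER_UNIT", "ARM_NUMBER_unit", "arm_number_unit"], all three are
--     returned. The downstream `is_best_numerical_match_for_unit_label` guard
--     prevents cross-contamination when multiple numerical labels compete for
--     unit labels.
--     """
--     exact_matches = []
--     case_insensitive_matches = []
--     label_name_lower = label_name.lower().strip()
--
--     for name in all_label_names:
--         if not check_if_unit_label(name):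
--             continue
--         prefix = get_unit_label_prefix(name)
--         if prefix == label_name:
--             exact_matches.append(name)
--         elif prefix.lower().strip() == label_name_lower:
--             case_insensitive_matches.append(name)
--
--     return exact_matches + case_insensitive_matches
-- ===== SOURCE B (Python) =====
-- def check_if_unit_label(label: str) -> bool:
--     return label.lower().strip().endswith("_unit")
--
-- def find_matching_unit_labels(label_name, all_label_names):
--     target = label_name.lower().strip()
--     matches = [n for n in all_label_names
--                if check_if_unit_label(n) and n[:-5].lower().strip() == target]
--     return sorted(matches, key=lambda n: 0 if n[:-5] == label_name else 1)
-- ===== Notes on version B (the rewrite author's own statement) =====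
-- stated objective: simpler
-- what changed: Replaced the two-bucket partition-and-concatenate loop with a single filter (one case-insensitive predicate, since an exact prefix match implies the case-insensitive one) followed by a stable sort on a 0/1 key that puts exact matches first.
import Mathlib
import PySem

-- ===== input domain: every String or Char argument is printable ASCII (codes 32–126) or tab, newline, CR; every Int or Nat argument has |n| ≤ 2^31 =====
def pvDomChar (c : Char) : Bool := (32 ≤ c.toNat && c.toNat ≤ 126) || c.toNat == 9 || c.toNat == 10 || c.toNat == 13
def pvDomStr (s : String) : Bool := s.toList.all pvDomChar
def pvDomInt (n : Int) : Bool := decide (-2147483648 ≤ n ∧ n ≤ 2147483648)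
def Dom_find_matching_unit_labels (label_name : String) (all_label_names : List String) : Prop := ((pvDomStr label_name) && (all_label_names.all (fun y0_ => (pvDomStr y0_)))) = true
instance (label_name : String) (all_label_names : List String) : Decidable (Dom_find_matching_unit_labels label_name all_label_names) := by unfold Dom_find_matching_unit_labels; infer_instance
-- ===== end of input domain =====

-- B replaces A's two-bucket partition loop by one filter plus a stable 0/1-key sort (simpler decomposition; same results).

-- ===== PORT A =====
def check_if_unit_label (label : String) : Bool :=
  PySem.Str.endswith (PySem.Str.strip (PySem.Str.lower label)) "_unit"

def get_unit_label_prefix (unit_label_name : String) : String :=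
  PySem.Str.slice unit_label_name none (some (-5))

-- the body of A's for-loop (exact_matches, case_insensitive_matches as the two components)
def stepA (label_name : String) (acc : List String × List String) (name : String) :
    List String × List String :=
  if ¬ check_if_unit_label name then acc
  else
    let pfx := get_unit_label_prefix name
    if pfx == label_name then (acc.1 ++ [name], acc.2)
    else if PySem.Str.strip (PySem.Str.lower pfx)
        == PySem.Str.strip (PySem.Str.lower label_name) then
      (acc.1, acc.2 ++ [name])
    else acc

def find_matching_unit_labels (label_name : String) (all_label_names : List String) : List String :=
  let st := all_label_names.foldl (stepA label_name) ([], [])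
  st.1 ++ st.2

-- ===== PORT B =====
def find_matching_unit_labels_alt (label_name : String) (all_label_names : List String) : List String :=
  let target := PySem.Str.strip (PySem.Str.lower label_name)
  let ms := all_label_names.filter (fun n =>
    check_if_unit_label n &&
      (PySem.Str.strip (PySem.Str.lower (PySem.Str.slice n none (some (-5)))) == target))
  PySem.List.sorted ms
    (fun n => if PySem.Str.slice n none (some (-5)) == label_name then (0 : Int) else 1) false

-- ===== PRECONDITION & SPEC =====
def Spec_find_matching_unit_labels (label_name : String) (all_label_names : List String) (out : List String) : Prop := out = find_matching_unit_labels_alt label_name all_label_names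
instance (label_name : String) (all_label_names : List String) (out : List String) : Decidable (Spec_find_matching_unit_labels label_name all_label_names out) := by unfold Spec_find_matching_unit_labels; infer_instance

-- ===== CLAIM (what is proved, stated in full; the proofs are below) =====
def Claim_equal_find_matching_unit_labels : Prop := ∀ (label_name : String) (all_label_names : List String), Dom_find_matching_unit_labels label_name all_label_names → Spec_find_matching_unit_labels label_name all_label_names (find_matching_unit_labels label_name all_label_names)

-- ===== LEMMAS AND PROOFS =====

-- insertBy puts x in front of a block whose every element is 'before'
theorem insertBy_of_forall_before {α : Type} (before : α → α → Bool) (x : α) (c : List α)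
    (hc : ∀ y ∈ c, before x y = true) : PySem.List.insertBy before x c = x :: c := by
  cases c with
  | nil => simp [PySem.List.insertBy]
  | cons y ys => simp [PySem.List.insertBy, hc y (by simp)]

theorem insertBy_append {α : Type} (before : α → α → Bool) (x : α) (e c : List α)
    (he : ∀ y ∈ e, before x y = false) (hc : ∀ y ∈ c, before x y = true) :
    PySem.List.insertBy before x (e ++ c) = e ++ x :: c := by
  induction e with
  | nil => simpa using insertBy_of_forall_before before x c hc
  | cons z e ih =>
    have hz : before x z = false := he z (by simp)
    simp [PySem.List.insertBy, hz]
    exact ih (fun y hy => he y (by simp [hy]))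

-- stable insertion sort on a 0/1 key: key-0 elements first, key-1 elements after, each in order
theorem foldl_insertBy_key01 {α : Type} (key : α → Int)
    (xs : List α) (e c : List α)
    (hx : ∀ x ∈ xs, key x = 0 ∨ key x = 1)
    (he : ∀ y ∈ e, key y = 0) (hc : ∀ y ∈ c, key y = 1) :
    xs.foldl (fun acc x => PySem.List.insertBy (fun a b => decide (key a < key b)) x acc) (e ++ c)
      = (e ++ xs.filter (fun x => key x == 0)) ++ (c ++ xs.filter (fun x => key x != 0)) := by
  induction xs generalizing e c with
  | nil => simp
  | cons x xs ih =>
    have hx' : ∀ z ∈ xs, key z = 0 ∨ key z = 1 := fun z hz => hx z (by simp [hz])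
    rcases hx x (by simp) with h0 | h1
    · have step : PySem.List.insertBy (fun a b => decide (key a < key b)) x (e ++ c)
          = (e ++ [x]) ++ c := by
        rw [insertBy_append]
        · simp
        · intro y hy; simp [he y hy, h0]
        · intro y hy; simp [hc y hy, h0]
      have he' : ∀ y ∈ e ++ [x], key y = 0 := by
        intro y hy; rcases List.mem_append.1 hy with h | h
        · exact he y h
        · simp at h; subst h; exact h0
      rw [List.foldl_cons, step, ih (e ++ [x]) c hx' he' hc]
      simp [h0]
    · have step : PySem.List.insertBy (fun a b => decide (key a < key b)) x (e ++ c)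
          = e ++ (c ++ [x]) := by
        have h : PySem.List.insertBy (fun a b => decide (key a < key b)) x ((e ++ c) ++ [])
            = (e ++ c) ++ x :: [] := by
          apply insertBy_append
          · intro y hy
            rcases List.mem_append.1 hy with h | h
            · simp [he y h, h1]
            · simp [hc y h, h1]
          · intro y hy; simp at hy
        simpa using h
      have hc' : ∀ y ∈ c ++ [x], key y = 1 := by
        intro y hy; rcases List.mem_append.1 hy with h | h
        · exact hc y h
        · simp at h; subst h; exact h1
      rw [List.foldl_cons, step, ih e (c ++ [x]) hx' he hc', ← List.append_assoc]
      simp [h1]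

-- the 0/1-key sort from the empty start
theorem sorted_key01 {α : Type} (key : α → Int) (xs : List α)
    (hx : ∀ x ∈ xs, key x = 0 ∨ key x = 1) :
    PySem.List.sorted xs key false
      = xs.filter (fun x => key x == 0) ++ xs.filter (fun x => key x != 0) := by
  rw [PySem.List.sorted_eq_foldl_insertBy]
  simpa using foldl_insertBy_key01 key xs [] [] hx (by simp) (by simp)

-- A's loop with its two accumulators, characterised as two filters
theorem loopA_eq (label_name : String) (xs : List String) (e c : List String) :
    xs.foldl (stepA label_name) (e, c)
    = (e ++ xs.filter (fun n => check_if_unit_label n && (get_unit_label_prefix n == label_name)),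
       c ++ xs.filter (fun n => check_if_unit_label n
          && !(get_unit_label_prefix n == label_name)
          && (PySem.Str.strip (PySem.Str.lower (get_unit_label_prefix n))
              == PySem.Str.strip (PySem.Str.lower label_name)))) := by
  induction xs generalizing e c with
  | nil => simp
  | cons x xs ih =>
    rw [List.foldl_cons]
    by_cases h1 : check_if_unit_label x
    · by_cases h2 : (get_unit_label_prefix x == label_name) = true
      · rw [show stepA label_name (e, c) x = (e ++ [x], c) from by simp [stepA, h1, h2], ih]
        simp [h1, h2]
      · by_cases h3 : (PySem.Str.strip (PySem.Str.lower (get_unit_label_prefix x))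
            == PySem.Str.strip (PySem.Str.lower label_name)) = true
        · rw [show stepA label_name (e, c) x = (e, c ++ [x]) from by simp [stepA, h1, h2, h3], ih]
          simp [h1, h2, h3]
        · rw [show stepA label_name (e, c) x = (e, c) from by simp [stepA, h1, h2, h3], ih]
          simp [h1, h2, h3]
    · rw [show stepA label_name (e, c) x = (e, c) from by simp [stepA, h1], ih]
      simp [h1]

-- ===== VERDICT (by name: the statement is the Claim_ definition above) =====
theorem find_matching_unit_labels_spec : Claim_equal_find_matching_unit_labels := by
  intro label_name xs _
  unfold Spec_find_matching_unit_labels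
  simp only [find_matching_unit_labels, find_matching_unit_labels_alt]
  rw [loopA_eq,
    sorted_key01
      (fun n => if PySem.Str.slice n none (some (-5)) == label_name then (0 : Int) else 1)
      _
      (by intro x _
          by_cases h : (PySem.Str.slice x none (some (-5)) == label_name) = true <;> simp [h])]
  simp only [List.nil_append, List.filter_filter]
  refine congrArg₂ (· ++ ·) ?_ ?_
  · apply List.filter_congr
    intro n _
    by_cases h2 : (get_unit_label_prefix n == label_name) = true
    · simp [get_unit_label_prefix] at h2
      simp [get_unit_label_prefix, h2]
    · simp [get_unit_label_prefix] at h2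
      simp [get_unit_label_prefix, h2]
  · apply List.filter_congr
    intro n _
    by_cases h2 : (get_unit_label_prefix n == label_name) = true
    · simp [get_unit_label_prefix] at h2
      simp [get_unit_label_prefix, h2]
    · simp [get_unit_label_prefix] at h2
      have h2' : (PySem.Str.slice n none (some (-5)) == label_name) = false :=
        beq_eq_false_iff_ne.mpr h2
      simp [get_unit_label_prefix, h2']
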